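-- pv_equiv track=rewrite | github.com/blackoutjack/jamweaver | util/util.py | get_info_path
-- ===== SOURCE A (Python) =====
-- def get_info_path(errp):
--   # %%% Ugly string searching.
--   lines = errp.split('\n')
--   infopath = None
--   infosearch = ' Analysis information: '
--   for line in lines:
--     # Parse the application name.
--     pos = line.find(infosearch)
--     if pos > -1:
--       endpos = pos + len(infosearch)
--       infopath = line[endpos:].strip()
--   return infopath
-- ===== SOURCE B (Python) =====
-- def get_info_path(errp):
--   # Reversed early-exit scan: the last matching line is the first match in reverse.
--   infosearch = ' Analysis information: '
--   for line in reversed(errp.split('\n')):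
--     pos = line.find(infosearch)
--     if pos > -1:
--       return line[pos + len(infosearch):].strip()
--   return None
-- ===== Notes on version B (the rewrite author's own statement) =====
-- stated objective: alternative
-- what changed: Replaces the forward full scan with an overwritten accumulator by a reversed traversal that returns at the first matching line (the last match overall).
import Mathlib
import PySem

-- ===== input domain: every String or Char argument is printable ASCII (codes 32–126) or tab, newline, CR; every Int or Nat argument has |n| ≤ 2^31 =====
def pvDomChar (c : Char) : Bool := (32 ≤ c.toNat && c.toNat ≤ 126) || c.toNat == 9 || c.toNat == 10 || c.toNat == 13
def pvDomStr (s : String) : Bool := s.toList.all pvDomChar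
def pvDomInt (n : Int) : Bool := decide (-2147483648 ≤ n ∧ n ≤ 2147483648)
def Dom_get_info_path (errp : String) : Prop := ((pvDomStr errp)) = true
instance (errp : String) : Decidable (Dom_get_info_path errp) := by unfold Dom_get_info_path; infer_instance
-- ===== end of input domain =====

-- B replaces A's forward scan with an overwritten accumulator by a reversed early-exit
-- traversal (same cost, different decomposition).

def pvInfosearch : String := " Analysis information: "

-- ===== PORT A =====
-- A's loop body: overwrite the accumulator whenever the marker occurs in the line.
def pvAStep (infopath : Option String) (line : String) : Option String :=
  let pos := PySem.Str.find line pvInfosearch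
  if pos > -1 then
    let endpos := pos + (PySem.Str.len pvInfosearch : Int)
    some (PySem.Str.strip (PySem.Str.slice line (some endpos) none))
  else infopath

def get_info_path (errp : String) : Option String :=
  let lines := (PySem.Str.split? errp "\n").getD []
  lines.foldl pvAStep none

-- ===== PORT B =====
-- B's loop: first match over the reversed line list, early return.
def pvBScan : List String → Option String
  | [] => none
  | line :: rest =>
    let pos := PySem.Str.find line pvInfosearch
    if pos > -1 then
      some (PySem.Str.strip (PySem.Str.slice line (some (pos + (PySem.Str.len pvInfosearch : Int))) none))
    else pvBScan rest

def get_info_path_alt (errp : String) : Option String :=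
  pvBScan ((PySem.Str.split? errp "\n").getD []).reverse

-- ===== PRECONDITION & SPEC =====
def Spec_get_info_path (errp : String) (out : Option String) : Prop := out = get_info_path_alt errp
instance (errp : String) (out : Option String) : Decidable (Spec_get_info_path errp out) := by unfold Spec_get_info_path; infer_instance

-- ===== CLAIM (what is proved, stated in full; the proofs are below) =====
def Claim_equal_get_info_path : Prop := ∀ (errp : String), Dom_get_info_path errp → Spec_get_info_path errp (get_info_path errp)

-- ===== LEMMAS AND PROOFS =====
theorem pvBScan_append_singleton (xs : List String) (l : String) :
    pvBScan (xs ++ [l]) = match pvBScan xs with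
      | some v => some v
      | none => pvBScan [l] := by
  induction xs with
  | nil => rfl
  | cons x xs ih =>
    simp only [List.cons_append, pvBScan]
    by_cases h : PySem.Str.find x pvInfosearch > -1
    · rw [if_pos h, if_pos h]
    · rw [if_neg h, if_neg h]; exact ih

theorem foldl_eq_revScan (ls : List String) (acc : Option String) :
    ls.foldl pvAStep acc = match pvBScan ls.reverse with
      | some v => some v
      | none => acc := by
  induction ls generalizing acc with
  | nil => simp [pvBScan]
  | cons l ls ih =>
    simp only [List.foldl_cons, List.reverse_cons]
    rw [ih, pvBScan_append_singleton]
    cases h : pvBScan ls.reverse with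
    | some v => rfl
    | none =>
      simp only [pvAStep, pvBScan]
      split_ifs <;> rfl

-- ===== VERDICT (by name: the statement is the Claim_ definition above) =====
theorem get_info_path_spec : Claim_equal_get_info_path := by
  intro errp _
  unfold Spec_get_info_path get_info_path get_info_path_alt
  rw [foldl_eq_revScan]
  cases pvBScan ((PySem.Str.split? errp "\n").getD []).reverse <;> rfl
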